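/-
  jsmn_s.bin, `jsmn_parse`: `case '{': case '[':` (10033FH – 1003B5H, 33 instructions + the two `return` stubs 1005DCH (NOMEM) and
  1005E7H (INVAL), 2 each).
      open_tail   100390H → 100486H   token->type = …; token->start = parser->pos; parser->toksuper = parser->toknext - 1
      open_spec   10033FH → 100486H | 100325H   count++; tokens == NULL → break; jsmn_alloc_token (by its contract); NULL → return -1;
                                                STRICT: tokens[toksuper].type == JSMN_OBJECT → return -2; tokens[toksuper].size++;
                                                token->parent = toksuper; then open_tail
  Model: `Jsmn.openBracket` with strict = parentLinks = true.
-/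
import Prog.Jsmn.S.ParseCallLemmas

namespace X86
namespace J6
namespace S
open X86.User (CodeAt RegsKept Span FlagsOK Layout toNat_add_ofNat toNat_ofNat_lt' add_ofNat_add)
open Jsmn JsmnSBytes

set_option maxRecDepth 100000
set_option maxHeartbeats 4000000
set_option linter.unusedSimpArgs false
set_option linter.unusedVariables false

/-- The switch sends `{` and `[` to `openBracket`. -/
theorem body_open (js : List UInt8) (fuel nt : Nat) (s : St) (ch : UInt8) (h : ch = 0x7b ∨ ch = 0x5b) :
    body Config.strictLinks js fuel nt s ch = some (openBracket Config.strictLinks ch nt s) := by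
  unfold body
  rcases h with rfl | rfl <;> simp

/-- The parser after the case: `toksuper = toknext - 1`. -/
def openFinP (p' : Parser) : Parser := { p' with toksuper := i32 (p'.toknext - 1) }
/-- The tokens after the case: the fresh token `i` has its type and its start. -/
def openFinT (ch : UInt8) (i : Nat) (p' : Parser) (tsL : Tokens) : Tokens :=
  tsL.set i { tsL.getD i default with type := if ch == 0x7b then JSMN_OBJECT else JSMN_ARRAY, start := i32 p'.pos }
/-- The tokens after `tokens[toksuper].size++; token->parent = toksuper`. -/
def openLinkT (i : Nat) (p' : Parser) (ts' : Tokens) : Tokens :=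
  (tokUpd ts' p'.toksuper fun t => { t with size := i32 (t.size + 1) }).set i
    { (tokUpd ts' p'.toksuper fun t => { t with size := i32 (t.size + 1) }).getD i default with parent := p'.toksuper }

/-- `openBracket` when there is a token array and room in it. -/
theorem openBracket_some {ch : UInt8} {nt : Nat} {s : St} {ts ts' : Tokens} {i : Nat} {p' : Parser} (hst : s.toks = some ts)
    (hal : allocToken Config.strictLinks s.p ts nt = some (i, p', ts')) :
    openBracket Config.strictLinks ch nt s =
      if p'.toksuper = -1 then .next ⟨openFinP p', some (openFinT ch i p' ts'), i32 (s.count + 1)⟩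
      else if (tokAt ts' p'.toksuper).type = JSMN_OBJECT then .ret JSMN_ERROR_INVAL ⟨p', some ts', i32 (s.count + 1)⟩
      else .next ⟨openFinP p', some (openFinT ch i p' (openLinkT i p' ts')), i32 (s.count + 1)⟩ := by
  unfold openBracket
  rw [hst]
  simp only [hal]
  by_cases h : p'.toksuper = -1
  · simp [h, openFinP, openFinT, Config.strictLinks]
  · by_cases h2 : (tokAt ts' p'.toksuper).type = JSMN_OBJECT <;> simp [h, h2, openFinP, openFinT, openLinkT, Config.strictLinks]

/-- `parser->toksuper = parser->toknext - 1`, as an `int`. -/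
theorem holds32_pred (t : Nat) (h : t < 4294967296) : Holds32 ((Word.low .w32 (UInt64.ofNat t - 1)).toNat % 256 ^ 4) (i32 ((t : Int) - 1)) := by
  have e : (Word.low .w32 (UInt64.ofNat t - 1)).toNat % 256 ^ 4 = u32 (i32 ((t : Int) - 1)) := by
    have e2 : u32 (i32 ((t : Int) - 1)) = (t + 4294967295) % 4294967296 := by unfold u32 i32; omega
    rw [e2]; v3_omega
  rw [e]
  exact holds32_of_range _ (i32_range _).1 (i32_range _).2

/-- `token->start = parser->pos`, as an `int`. -/
theorem holds32_pos (t : Nat) (h : t < 4294967296) : Holds32 ((Word.low .w32 (UInt64.ofNat t)).toNat % 256 ^ 4) (i32 (t : Int)) := by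
  have e : (Word.low .w32 (UInt64.ofNat t)).toNat % 256 ^ 4 = u32 (i32 (t : Int)) := by
    have e2 : u32 (i32 (t : Int)) = t := by unfold u32 i32; omega
    rw [e2]; v3_omega
  rw [e]
  exact holds32_of_range _ (i32_range _).1 (i32_range _).2

/-- **`token->parent = x`** (`mov [rax+16], edx`, rax = &tokens[i]): the array afterwards is the model's `set`. `w` is the word stored. -/
theorem parent_tokens {μ : User.Mem} {tb : Word} {ts : Tokens} {i k w : Nat} {x : Int} (h : TokensAt Config.strictLinks μ tb ts) (hl : ts.length = k)
    (hi : i < k) (hlt : tb.toNat + 20 * k < 2 ^ 64) (hw : Holds32 (w % 256 ^ 4) x) :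
    TokensAt Config.strictLinks (μ.writeLE (tb + UInt64.ofNat (20 * i) + 16) 4 w) tb (ts.set i { ts.getD i default with parent := x }) := by
  have hil : i < ts.length := hl ▸ hi
  have hmul := tokSize_mul_le Config.strictLinks hil
  rw [tokSize_strictLinks] at hmul
  have ht0 := h.getD i hil
  have haddr := A2.tokAddr20 tb i
  refine TokensAt.update h hil (by rw [tokSize_strictLinks, hl]; exact hlt) (by rw [tokSize_strictLinks]; v3_eqon)
    (by rw [tokSize_strictLinks, hl]; v3_eqon) ?_
  rw [haddr] at ht0 ⊢
  have hsz := ht0.size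
  have ht := ht0.type
  have hs := ht0.start
  have he := ht0.end
  refine ⟨by v3_frame ht, by v3_frame hs, by v3_frame he, by v3_frame hsz, fun _ => holds32_read (by v3_read) hw⟩

variable {n : User.Layout}

/-- **100390H → 100486H**: the fresh token (`rax = &tokens[i]`) gets its type and start, `toksuper` becomes `toknext - 1`. -/
theorem open_tail {c : PCtx} {v0 v : User.State} {p' : Parser} {tsL : Tokens} {i : Nat} {ch : UInt8}
    (hrip : v.rip = 0x100390) (hco : FrameCore c n v0 v p' (some tsL)) (hrax : v.reg .rax = c.tb + UInt64.ofNat (20 * i))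
    (hrbx : v.reg .rbx = ch.toUInt64) (hilt : i < c.numTokens) :
    Reach n v (fun v' => v'.rip = 0x100486 ∧ FrameCore c n v0 v' (openFinP p') (some (openFinT ch i p' tsL)) ∧ v'.reg .r12 = v.reg .r12) := by
  have hp := hco.entry.pre
  have himg := hco.image
  have hcode := hco.code
  have hfetch := hp.call.fetch
  obtain ⟨htb0, htlen, htoks⟩ := hco.toksArg
  have hpa := hco.parser
  have henv := hp.env
  have htb : toksBytes binS.cfg c.numTokens c.toks0 = 20 * c.numTokens := by
    rw [← toksBytes_congr _ _ hco.null]; rfl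
  rw [htb] at henv
  have hR := henv.toksR.resolve_left htb0
  v3_open hco.rsp hco.rbp hco.r13 hp.call henv.parserR hR henv.parserToks hpa.pos hpa.toknext
  clear hp_call_rip
  j6_bin
  have hposlt : p'.pos < 4294967296 := hpa_pos ▸ User.Mem.readLE4_lt _ _
  have hnextlt : p'.toknext < 4294967296 := hpa_toknext ▸ User.Mem.readLE4_lt _ _
  have hil : i < tsL.length := htlen ▸ hilt
  have hmul := tokSize_mul_le Config.strictLinks hil
  rw [tokSize_strictLinks, htlen] at hmul
  have ht0 := htoks.getD i hil
  have haddr := A2.tokAddr20 c.tb i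
  rw [haddr] at ht0
  have ht0e := ht0.end
  have ht0s := ht0.size
  have ht0p := ht0.parent rfl
  have hsup := hpa.toksuper
  v3_walk hcode hfetch [show ((233 : Nat) == 235) = false by decide, show ((233 : UInt8) == 235) = false by decide,
    show ((233 : UInt64) == 235) = false by decide] until [0x100486]
  all_goals
    have hch := byte_toUInt64_mod ch
    refine Reach.done ⟨by simp, A2.core_step hco (by v3_regnorm) (by v3_regnorm) (by v3_regnorm) (by v3_regnorm) (by v3_regnorm)
      (by unfold dataWins PCtx.tlen; rw [htb]; v3_same) ⟨by v3_frame hpa_pos, by v3_frame hpa_toknext, holds32_read (by v3_read) (holds32_pred _ hnextlt)⟩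
      ⟨htb0, by simp [openFinT, htlen], ?_⟩ (by simp), by v3_regnorm⟩
    v3_memnorm
    refine TokensAt.update htoks hil (by rw [tokSize_strictLinks, htlen]; v3_omega) (by rw [tokSize_strictLinks]; v3_eqon)
      (by rw [tokSize_strictLinks, htlen]; v3_eqon) ?_
    rw [haddr]
    refine ⟨?_, holds32_read (by v3_read) (holds32_pos _ hposlt), by v3_frame ht0e, by v3_frame ht0s, fun _ => by v3_frame ht0p⟩
  · have hc : ch = 0x7b := UInt8.toNat_inj.mp (by rw [← hch, hbr_100393]; rfl)
    subst hc
    show _ = JSMN_OBJECT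
    v3_read
  · have hc : ¬ ch = 0x7b := fun h => hbr_100393 (by rw [h]; rfl)
    have : (ch == 0x7b) = false := by simpa using hc
    dsimp only
    rw [this]
    show _ = JSMN_ARRAY
    v3_read

end S
end J6
end X86
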